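-- pv_equiv track=rewrite | github.com/ehdnd/SCCC | BOJ_extra/greedy/1422.py | modify_num
-- ===== SOURCE A (Python) =====
-- def modify_num(num: str) -> str:
--     l = len(num)
--     cnt = 0
--     res = ""
--     while len(res) < 10:
--         res += num[cnt % l]
--         cnt += 1
--     return res
-- ===== SOURCE B (Python) =====
-- def modify_num(num: str) -> str:
--     l = len(num)
--     return (num * (10 // l + 1))[:10]
-- ===== Notes on version B (the rewrite author's own statement) =====
-- stated objective: idiomatic
-- what changed: Replaces the character-by-character modulo-index while loop with a single closed-form repetition-and-slice expression (num * (10//l + 1))[:10]; the 10//l division keeps the ZeroDivisionError on empty input that A also raises (via cnt % 0), so no returning input is excluded.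
import Mathlib
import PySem

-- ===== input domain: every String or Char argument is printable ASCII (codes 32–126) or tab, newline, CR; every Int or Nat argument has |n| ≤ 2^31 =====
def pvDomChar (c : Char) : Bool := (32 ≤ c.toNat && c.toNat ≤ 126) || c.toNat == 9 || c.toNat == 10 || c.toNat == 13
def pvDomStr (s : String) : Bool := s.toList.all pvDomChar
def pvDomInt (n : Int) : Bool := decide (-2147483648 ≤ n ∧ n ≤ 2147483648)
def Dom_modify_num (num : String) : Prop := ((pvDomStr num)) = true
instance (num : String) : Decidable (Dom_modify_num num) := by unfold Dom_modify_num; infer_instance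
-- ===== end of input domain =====

-- B replaces A's character-by-character modulo-index loop with one repetition-and-slice
-- closed form; objective: idiomatic. Both raise ZeroDivisionError on "" (excluded by Pre_).

-- ===== PORT A =====
-- the while loop: res grows by one char per iteration until len(res) = 10;
-- num[cnt % l] is PySem.List.pyGet? with PySem.Int.mod (none is unreachable under Pre_)
def modifyLoop (chars : List Char) (l cnt : Int) (res : List Char) : List Char :=
  if _h : res.length < 10 then
    match PySem.List.pyGet? chars (PySem.Int.mod cnt l) with
    | some c => modifyLoop chars l (cnt + 1) (res ++ [c])
    | none => res
  else res
termination_by 10 - res.length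
decreasing_by simp; omega

def modify_num (num : String) : String :=
  String.mk (modifyLoop num.toList (num.toList.length : Int) 0 [])

-- ===== PORT B =====
-- (num * (10 // l + 1))[:10] : Python string repetition is flatten ∘ replicate
-- (negative/zero count gives ""), 10 // l is PySem.Int.floordiv, [:10] is take 10
-- (PySem.List.slice_to_natCast)
def modify_num_alt (num : String) : String :=
  String.mk (List.take 10 (List.flatten
    (List.replicate (PySem.Int.floordiv 10 (num.toList.length : Int) + 1).toNat num.toList)))

-- ===== PRECONDITION & SPEC =====
-- A raises ZeroDivisionError (cnt % 0) on the empty string, and so does B (10 // 0)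
def Pre_modify_num (num : String) : Prop := num ≠ ""
instance (num : String) : Decidable (Pre_modify_num num) := by unfold Pre_modify_num; infer_instance

def pvWitness_modify_num : String := "ab"

def Spec_modify_num (num : String) (out : String) : Prop := out = modify_num_alt num
instance (num : String) (out : String) : Decidable (Spec_modify_num num out) := by unfold Spec_modify_num; infer_instance

-- ===== CLAIM (what is proved, stated in full; the proofs are below) =====
def Claim_equal_modify_num : Prop := ∀ (num : String), Dom_modify_num num → Pre_modify_num num → Spec_modify_num num (modify_num num)

-- ===== LEMMAS AND PROOFS =====

-- the common characterisation: ten characters of the cycle of cs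
def cyc (cs : List Char) (i : Nat) : Char := cs.getD (i % cs.length) 'x'

theorem map_cyc_range_len (cs : List Char) :
    (List.range cs.length).map (cyc cs) = cs := by
  apply List.ext_getElem
  · simp
  · intro i h1 h2
    simp [cyc, List.getD, Nat.mod_eq_of_lt (by simpa using h2), List.getElem?_eq_getElem h2]

theorem flatten_replicate_eq_map_range (cs : List Char) (k : Nat) :
    List.flatten (List.replicate k cs) = (List.range (k * cs.length)).map (cyc cs) := by
  induction k with
  | zero => simp
  | succ k ih =>
      rw [List.replicate_succ, List.flatten_cons, ih,
        show (k + 1) * cs.length = cs.length + k * cs.length by ring,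
        List.range_add, List.map_append]
      congr 1
      · exact (map_cyc_range_len cs).symm
      · rw [List.map_map]
        apply List.map_congr_left
        intro i _
        simp [cyc, Nat.add_mod_left]

theorem loop_eq (cs : List Char) (hcs : cs ≠ []) (n : Nat) (res : List Char) :
    modifyLoop cs (cs.length : Int) (n : Int) res
      = res ++ (List.range (10 - res.length)).map (fun i => cyc cs (n + i)) := by
  by_cases h : res.length < 10
  · have hlen : 0 < cs.length := List.length_pos_iff.mpr hcs
    have hmod : PySem.Int.mod (n : Int) (cs.length : Int) = ((n % cs.length : Nat) : Int) :=
      PySem.Int.mod_natCast n cs.length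
    have hget : PySem.List.pyGet? cs (PySem.Int.mod (n : Int) (cs.length : Int))
        = some (cyc cs n) := by
      rw [hmod, PySem.List.pyGet?_natCast]
      simp [cyc, List.getD, List.getElem?_eq_getElem (Nat.mod_lt n hlen)]
    rw [modifyLoop, dif_pos h]
    simp only [hget]
    rw [show ((n : Int) + 1) = ((n + 1 : Nat) : Int) by push_cast; ring,
      loop_eq cs hcs (n + 1) (res ++ [cyc cs n])]
    have hk : 10 - res.length = (10 - (res ++ [cyc cs n]).length) + 1 := by
      simp; omega
    rw [hk, List.range_succ_eq_map, List.map_cons, List.append_assoc]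
    simp only [List.singleton_append, List.map_map]
    congr 2
    apply List.map_congr_left
    intro i _
    simp [Function.comp]
    congr 1
    omega
  · rw [modifyLoop, dif_neg h]
    have h0 : 10 - res.length = 0 := by omega
    simp [h0]
termination_by 10 - res.length
decreasing_by simp; omega

theorem ten_le (l : Nat) (hl : 0 < l) : 10 ≤ (10 / l + 1) * l := by
  have h1 := Nat.div_add_mod 10 l
  have h2 := Nat.mod_lt 10 hl
  nlinarith

-- ===== VERDICT (by name: the statement is the Claim_ definition above) =====
theorem modify_num_spec : Claim_equal_modify_num := by
  intro num _ hpre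
  unfold Spec_modify_num modify_num modify_num_alt
  set cs := num.toList with hcs
  have hne : cs ≠ [] := by
    intro h
    apply hpre
    rw [hcs] at h
    cases num
    simp_all
  have hlen : 0 < cs.length := List.length_pos_iff.mpr hne
  -- A side
  have hA := loop_eq cs hne 0 []
  simp only [Nat.cast_zero, List.nil_append, List.length_nil, Nat.sub_zero, Nat.zero_add] at hA
  rw [hA]
  -- B side: the repetition count
  have hk : (PySem.Int.floordiv 10 (cs.length : Int) + 1).toNat = 10 / cs.length + 1 := by
    have h10 : PySem.Int.floordiv 10 (cs.length : Int) = ((10 / cs.length : Nat) : Int) := by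
      exact_mod_cast PySem.Int.floordiv_natCast 10 cs.length
    rw [h10]
    generalize 10 / cs.length = b
    omega
  rw [hk, flatten_replicate_eq_map_range, ← List.map_take, List.take_range,
    Nat.min_eq_left (ten_le cs.length hlen)]
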